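-- pv_equiv track=rewrite | github.com/AWAlexWeber/python-practice | Other/Companies/Amazon/AmazonBlind/SmallestNegativeDebt.py | smallestNegativeDebt
-- ===== SOURCE A (Python) =====
-- from typing import List
-- from collections import defaultdict
--
-- def smallestNegativeDebt(debt: List[tuple]) -> List[str]:
--     # We are going to maintain a dictionary with a key of the user and a value of total debt
--     # For every entry we increment the lender and decrement the borrower.
--     # O(nlogn) time complexity, O(n) space complexity. I think this is about the best we can get (considering the sorting element)
--     debtDictionary = defaultdict(lambda: 0)
--
--     for entry in debt:
--         borrower, lender, amount = (entry)
--         debtDictionary[borrower] -= amount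
--         debtDictionary[lender] += amount
--
--
--     # Alright now we find all the negative values
--     output = list()
--     maximumDebt = float('inf')
--
--     for entry in debtDictionary.keys():
--         if debtDictionary[entry] < 0:
--             if maximumDebt > debtDictionary[entry]:
--                 output = list()
--                 output.append(entry)
--                 maximumDebt = debtDictionary[entry]
--             elif maximumDebt == debtDictionary[entry]:
--                 output.append(entry)
--
--     return sorted(output)
-- ===== SOURCE B (Python) =====
-- def smallestNegativeDebt(debt):
--     # Dict-free alternative: dedup the participants in first-appearance order, then
--     # compute each user's net balance by a full scan over the transactions.
--     users = []
--     for borrower, lender, _ in debt: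
--         if borrower not in users:
--             users.append(borrower)
--         if lender not in users:
--             users.append(lender)
--
--     def balance(user):
--         credit = sum(a for _, l, a in debt if l == user)
--         debit = sum(a for b, _, a in debt if b == user)
--         return credit - debit
--
--     m = min((balance(u) for u in users), default=0)
--     if m >= 0:
--         return []
--     return sorted(u for u in users if balance(u) == m)
-- ===== Notes on version B (the rewrite author's own statement) =====
-- stated objective: alternative
-- what changed: A's single-pass dict aggregation with an interleaved running-minimum/output-rebuild loop is replaced by a dict-free scheme: an ordered dedup list of participants, a per-user net balance recomputed by a full scan of the transactions, then a separate min and filter; it trades speed for not maintaining any mutable aggregate.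
import Mathlib
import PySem

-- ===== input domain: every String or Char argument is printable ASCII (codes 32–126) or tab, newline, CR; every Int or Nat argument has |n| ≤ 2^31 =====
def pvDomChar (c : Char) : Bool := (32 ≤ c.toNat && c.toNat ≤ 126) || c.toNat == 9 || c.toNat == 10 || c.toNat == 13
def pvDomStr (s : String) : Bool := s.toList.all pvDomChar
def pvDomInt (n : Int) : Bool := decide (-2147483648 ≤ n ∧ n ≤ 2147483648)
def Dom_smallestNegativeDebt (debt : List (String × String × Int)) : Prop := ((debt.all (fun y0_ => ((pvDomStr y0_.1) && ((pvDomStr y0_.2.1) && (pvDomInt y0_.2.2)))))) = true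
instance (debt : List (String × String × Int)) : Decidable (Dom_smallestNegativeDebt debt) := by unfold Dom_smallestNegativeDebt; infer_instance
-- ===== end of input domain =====

-- B is dict-free: an ordered dedup list of participants, per-user balances recomputed by
-- full scans, then a separate min and filter (objective: alternative algorithm, not faster).

-- ===== PORT A =====
-- float('inf') is modelled as `none`: `none > v` is true and `none == some v` is false for
-- every Int v, exactly as inf compares with ints in Python.
def pvInfGt (m : Option Int) (v : Int) : Bool :=
  match m with
  | none => true
  | some x => decide (x > v)

def pvStepA (st : List String × Option Int) (p : String × Int) : List String × Option Int :=
  if p.2 < 0 then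
    if pvInfGt st.2 p.2 then ([p.1], some p.2)
    else if st.2 == some p.2 then (st.1 ++ [p.1], st.2)
    else st
  else st

def smallestNegativeDebt (debt : List (String × String × Int)) : List String :=
  let debtDictionary : PySem.Dict String Int :=
    debt.foldl (fun d entry =>
      let d := d.insert entry.1 (d.getD entry.1 0 - entry.2.2)
      d.insert entry.2.1 (d.getD entry.2.1 0 + entry.2.2)) PySem.Dict.empty
  let st := debtDictionary.keys.foldl
      (fun st entry => pvStepA st (entry, debtDictionary.getD entry 0)) ([], none)
  PySem.List.sorted st.1 (fun y => y) false

-- ===== PORT B =====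
-- balance(user): two sum-comprehensions over the transaction list
def pvBalB (debt : List (String × String × Int)) (u : String) : Int :=
  ((debt.filter (fun e => e.2.1 == u)).map (fun e => e.2.2)).sum
    - ((debt.filter (fun e => e.1 == u)).map (fun e => e.2.2)).sum

def smallestNegativeDebt_alt (debt : List (String × String × Int)) : List String :=
  let users : List String :=
    debt.foldl (fun us e =>
      let us := if us.contains e.1 then us else us ++ [e.1]
      if us.contains e.2.1 then us else us ++ [e.2.1]) []
  let m := (PySem.List.min? (users.map (pvBalB debt)) (fun y => y)).getD 0
  if 0 ≤ m then []
  else PySem.List.sorted (users.filter (fun u => pvBalB debt u == m)) (fun y => y) false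

-- ===== PRECONDITION & SPEC =====
def Spec_smallestNegativeDebt (debt : List (String × String × Int)) (out : List String) : Prop := out = smallestNegativeDebt_alt debt
instance (debt : List (String × String × Int)) (out : List String) : Decidable (Spec_smallestNegativeDebt debt out) := by unfold Spec_smallestNegativeDebt; infer_instance

-- ===== CLAIM (what is proved, stated in full; the proofs are below) =====
def Claim_equal_smallestNegativeDebt : Prop := ∀ (debt : List (String × String × Int)), Dom_smallestNegativeDebt debt → Spec_smallestNegativeDebt debt (smallestNegativeDebt debt)

-- ===== LEMMAS AND PROOFS =====

-- the aggregation dict A builds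
def pvAgg (debt : List (String × String × Int)) : PySem.Dict String Int :=
  debt.foldl (fun d entry =>
    let d := d.insert entry.1 (d.getD entry.1 0 - entry.2.2)
    d.insert entry.2.1 (d.getD entry.2.1 0 + entry.2.2)) PySem.Dict.empty

-- the participant list B builds
def pvUsers (debt : List (String × String × Int)) : List String :=
  debt.foldl (fun us e =>
    let us := if us.contains e.1 then us else us ++ [e.1]
    if us.contains e.2.1 then us else us ++ [e.2.1]) []

theorem pvAgg_append (l : List (String × String × Int)) (x : String × String × Int) :
    pvAgg (l ++ [x]) =
      ((pvAgg l).insert x.1 ((pvAgg l).getD x.1 0 - x.2.2)).insert x.2.1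
        (((pvAgg l).insert x.1 ((pvAgg l).getD x.1 0 - x.2.2)).getD x.2.1 0 + x.2.2) := by
  simp [pvAgg, List.foldl_append]

theorem pvUsers_append (l : List (String × String × Int)) (x : String × String × Int) :
    pvUsers (l ++ [x]) =
      (let us := pvUsers l
       let us := if us.contains x.1 then us else us ++ [x.1]
       if us.contains x.2.1 then us else us ++ [x.2.1]) := by
  simp [pvUsers, List.foldl_append]

theorem keys_insert_eq (d : PySem.Dict String Int) (k : String) (v : Int) :
    (d.insert k v).keys = if d.keys.contains k then d.keys else d.keys ++ [k] := by
  by_cases h : k ∈ d.keys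
  · rw [PySem.Dict.keys_insert_of_contains d v ((PySem.Dict.contains_iff_mem_keys d k).2 h)]
    simp [h]
  · have hc : d.contains k = false := by
      cases hc : d.contains k
      · rfl
      · exact absurd ((PySem.Dict.contains_iff_mem_keys d k).1 hc) h
    rw [PySem.Dict.keys_insert_of_not_contains d v hc]
    simp [h]

theorem users_eq_keys (debt : List (String × String × Int)) :
    pvUsers debt = (pvAgg debt).keys := by
  induction debt using List.reverseRecOn with
  | nil => simp [pvUsers, pvAgg, PySem.Dict.keys_empty]
  | append_singleton l x ih =>
    rw [pvUsers_append, pvAgg_append, keys_insert_eq, keys_insert_eq, ih]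

theorem balB_append (l : List (String × String × Int)) (x : String × String × Int) (u : String) :
    pvBalB (l ++ [x]) u =
      pvBalB l u + (if u = x.2.1 then x.2.2 else 0) - (if u = x.1 then x.2.2 else 0) := by
  have hf2 : ((List.filter (fun e => e.2.1 == u) [x]).map (fun e => e.2.2)).sum
      = (if u = x.2.1 then x.2.2 else 0) := by
    by_cases h : u = x.2.1
    · subst h; simp
    · rw [if_neg h]
      have hb : (x.2.1 == u) = false := by
        simpa [beq_iff_eq] using fun hh => h hh.symm
      simp [hb]
  have hf1 : ((List.filter (fun e => e.1 == u) [x]).map (fun e => e.2.2)).sum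
      = (if u = x.1 then x.2.2 else 0) := by
    by_cases h : u = x.1
    · subst h; simp
    · rw [if_neg h]
      have hb : (x.1 == u) = false := by
        simpa [beq_iff_eq] using fun hh => h hh.symm
      simp [hb]
  simp only [pvBalB, List.filter_append, List.map_append, List.sum_append, hf2, hf1]
  ring

theorem balB_eq_getD (debt : List (String × String × Int)) (u : String) :
    pvBalB debt u = (pvAgg debt).getD u 0 := by
  induction debt using List.reverseRecOn with
  | nil => simp [pvBalB, pvAgg, PySem.Dict.getD_empty]
  | append_singleton l x ih =>
    rw [balB_append, pvAgg_append, ih]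
    simp only [PySem.Dict.getD_insert]
    split_ifs <;> simp_all

-- minimum of the negative values of an item list, `none` if there is none
def minNegStep (acc : Option Int) (p : String × Int) : Option Int :=
  if p.2 < 0 then
    match acc with
    | none => some p.2
    | some m => some (min m p.2)
  else acc

def minNeg (l : List (String × Int)) : Option Int :=
  l.foldl minNegStep none

theorem minNeg_append (l : List (String × Int)) (x : String × Int) :
    minNeg (l ++ [x]) = minNegStep (minNeg l) x := by
  simp [minNeg, List.foldl_append]

theorem minNeg_none (l : List (String × Int)) (h : minNeg l = none) :
    ∀ p ∈ l, 0 ≤ p.2 := by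
  induction l using List.reverseRecOn with
  | nil => simp
  | append_singleton l x ih =>
    rw [minNeg_append] at h
    by_cases hx : x.2 < 0
    · cases hacc : minNeg l <;> simp [minNegStep, hx, hacc] at h
    · have hacc : minNeg l = none := by simpa [minNegStep, hx] using h
      intro p hp
      rcases List.mem_append.1 hp with hp | hp
      · exact ih hacc p hp
      · simp at hp; subst hp; omega

theorem minNeg_some (l : List (String × Int)) (m : Int) (h : minNeg l = some m) :
    m < 0 ∧ (∀ p ∈ l, p.2 < 0 → m ≤ p.2) ∧ ∃ p ∈ l, p.2 = m := by
  induction l using List.reverseRecOn generalizing m with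
  | nil => simp [minNeg] at h
  | append_singleton l x ih =>
    rw [minNeg_append] at h
    by_cases hx : x.2 < 0
    · cases hacc : minNeg l with
      | none =>
        rw [hacc] at h; simp [minNegStep, hx] at h
        refine ⟨by omega, ?_, ⟨x, by simp, by omega⟩⟩
        intro p hp hneg
        rcases List.mem_append.1 hp with hp | hp
        · have := minNeg_none l hacc p hp; omega
        · simp at hp; subst hp; omega
      | some m0 =>
        rw [hacc] at h; simp [minNegStep, hx] at h
        obtain ⟨h0, h1, p0, hp0, hp0v⟩ := ih m0 hacc
        constructor
        · omega
        constructor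
        · intro p hp hneg
          rcases List.mem_append.1 hp with hp | hp
          · have := h1 p hp hneg; omega
          · simp at hp; subst hp; omega
        · rcases le_total m0 x.2 with hle | hle
          · exact ⟨p0, List.mem_append.2 (Or.inl hp0), by omega⟩
          · exact ⟨x, by simp, by omega⟩
    · have h' : minNeg l = some m := by simpa [minNegStep, hx] using h
      obtain ⟨h0, h1, p0, hp0, hp0v⟩ := ih m h'
      refine ⟨h0, ?_, ⟨p0, List.mem_append.2 (Or.inl hp0), hp0v⟩⟩
      intro p hp hneg
      rcases List.mem_append.1 hp with hp | hp
      · exact h1 p hp hneg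
      · simp at hp; subst hp; omega

-- characterization of A's selection loop
theorem loopA_char (l : List (String × Int)) :
    l.foldl pvStepA ([], none) =
      match minNeg l with
      | none => (([] : List String), (none : Option Int))
      | some m => ((l.filter (fun p => p.2 == m)).map (fun p => p.1), some m) := by
  induction l using List.reverseRecOn with
  | nil => simp [minNeg]
  | append_singleton l x ih =>
    rw [List.foldl_append, List.foldl_cons, List.foldl_nil, ih, minNeg_append]
    cases hl : minNeg l with
    | none =>
      by_cases hx : x.2 < 0
      · have hno : ∀ p ∈ l, ¬ (p.2 == x.2) := by
          intro p hp
          have := minNeg_none l hl p hp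
          simp; omega
        simp [pvStepA, pvInfGt, minNegStep, hx, List.filter_append,
          List.filter_eq_nil_iff.2 (by intro p hp; exact hno p hp)]
      · simp [pvStepA, minNegStep, hx]
    | some m =>
      obtain ⟨hm0, hmle, pm, hpm, hpmv⟩ := minNeg_some l m hl
      by_cases hx : x.2 < 0
      · simp only [pvStepA, hx, if_pos]
        by_cases hlt : x.2 < m
        · have hgt : pvInfGt (some m) x.2 = true := by simp [pvInfGt]; omega
          have hno : ∀ p ∈ l, ¬ (p.2 == x.2) := by
            intro p hp
            simp
            intro hcontra
            have := hmle p hp (by omega); omega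
          have hmin : min m x.2 = x.2 := by omega
          simp [hgt, hmin, minNegStep, hx, List.filter_append,
            List.filter_eq_nil_iff.2 (by intro p hp; exact hno p hp)]
        · by_cases heq : m = x.2
          · subst heq
            have hgt : pvInfGt (some x.2) x.2 = false := by simp [pvInfGt]
            simp [hgt, minNegStep, hx, List.filter_append]
          · have hgt : pvInfGt (some m) x.2 = false := by simp [pvInfGt]; omega
            have hmin : min m x.2 = m := by omega
            have hne : ¬ (x.2 == m) := by simp; omega
            simp [hgt, hmin, minNegStep, hx, List.filter_append, hne, heq]
      · have hne : ¬ (x.2 == m) := by simp; omega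
        simp [pvStepA, minNegStep, hx, List.filter_append, hne]

-- the two selection phases agree on any dict with unique keys
theorem select_eq (d : PySem.Dict String Int) (hnd : d.keys.Nodup) :
    PySem.List.sorted (d.keys.foldl (fun st entry => pvStepA st (entry, d.getD entry 0)) ([], none)).1 (fun y => y) false =
      (if 0 ≤ (PySem.List.min? (d.keys.map (fun u => d.getD u 0)) (fun y => y)).getD 0 then []
       else PySem.List.sorted (d.keys.filter (fun u => d.getD u 0 ==
         (PySem.List.min? (d.keys.map (fun u => d.getD u 0)) (fun y => y)).getD 0)) (fun y => y) false) := by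
  have hitems : d.items = d.keys.map (fun k => (k, d.getD k 0)) :=
    PySem.Dict.items_eq_map_keys d hnd 0
  have hvals : d.keys.map (fun u => d.getD u 0) = d.values :=
    (PySem.Dict.values_eq_map_keys d hnd 0).symm
  have hfold : d.keys.foldl (fun st entry => pvStepA st (entry, d.getD entry 0)) ([], none)
      = d.items.foldl pvStepA ([], none) := by
    rw [hitems, List.foldl_map]
  have hfilter : ∀ m : Int, (d.items.filter (fun p => p.2 == m)).map (fun p => p.1)
      = d.keys.filter (fun u => d.getD u 0 == m) := by
    intro m
    rw [hitems, List.filter_map, List.map_map]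
    simp [Function.comp_def]
  rw [hfold, loopA_char, hvals]
  have hvals' : d.values = d.items.map (fun p => p.2) := rfl
  cases hl : minNeg d.items with
  | none =>
    have hnonneg : ∀ v ∈ d.values, 0 ≤ v := by
      rw [hvals']
      intro v hv
      obtain ⟨p, hp, rfl⟩ := List.mem_map.1 hv
      exact minNeg_none d.items hl p hp
    cases hv : d.values with
    | nil => simp [PySem.List.min?, PySem.List.sorted]
    | cons v t =>
      have hmem : t.foldl min v ∈ d.values :=
        PySem.List.min?_mem (xs := d.values) (key := fun y => y)
          (by rw [hv, PySem.List.min?_id_cons])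
      have h0 : 0 ≤ t.foldl min v := hnonneg _ hmem
      simp [PySem.List.min?_id_cons, h0, PySem.List.sorted]
  | some m =>
    obtain ⟨hm0, hmle, pm, hpm, hpmv⟩ := minNeg_some d.items m hl
    have hmmem : m ∈ d.values := by
      rw [hvals']; exact List.mem_map.2 ⟨pm, hpm, hpmv⟩
    cases hv : d.values with
    | nil => rw [hv] at hmmem; simp at hmmem
    | cons v t =>
      have hsome : PySem.List.min? d.values (fun y => y) = some (t.foldl min v) := by
        rw [hv, PySem.List.min?_id_cons]
      have hmin_mem : t.foldl min v ∈ d.values := PySem.List.min?_mem hsome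
      have hle1 : t.foldl min v ≤ m := PySem.List.min?_isMin hsome m hmmem
      have hle2 : m ≤ t.foldl min v := by
        obtain ⟨p, hp, hpv⟩ := List.mem_map.1 (hvals' ▸ hmin_mem)
        exact hpv ▸ hmle p hp (by omega)
      have heqm : t.foldl min v = m := le_antisymm hle1 hle2
      simp [PySem.List.min?_id_cons, heqm, show ¬ (0:Int) ≤ m by omega, hfilter]

-- keys of the aggregation dict stay unique
theorem agg_nodup (debt : List (String × String × Int)) : (pvAgg debt).keys.Nodup := by
  induction debt using List.reverseRecOn with
  | nil => simp [pvAgg, PySem.Dict.keys_empty]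
  | append_singleton l x ih =>
    rw [pvAgg_append]
    exact PySem.Dict.nodup_keys_insert _ _ _ (PySem.Dict.nodup_keys_insert _ _ _ ih)

-- ===== VERDICT (by name: the statement is the Claim_ definition above) =====
theorem smallestNegativeDebt_spec : Claim_equal_smallestNegativeDebt := by
  intro debt _
  unfold Spec_smallestNegativeDebt
  have hkeys := users_eq_keys debt
  have hb : ∀ u, pvBalB debt u = (pvAgg debt).getD u 0 := balB_eq_getD debt
  have hB : smallestNegativeDebt_alt debt =
      (if 0 ≤ (PySem.List.min? ((pvAgg debt).keys.map (fun u => (pvAgg debt).getD u 0)) (fun y => y)).getD 0 then []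
       else PySem.List.sorted ((pvAgg debt).keys.filter (fun u => (pvAgg debt).getD u 0 ==
         (PySem.List.min? ((pvAgg debt).keys.map (fun u => (pvAgg debt).getD u 0)) (fun y => y)).getD 0)) (fun y => y) false) := by
    show (if 0 ≤ (PySem.List.min? ((pvUsers debt).map (pvBalB debt)) (fun y => y)).getD 0 then []
          else PySem.List.sorted ((pvUsers debt).filter (fun u => pvBalB debt u ==
            (PySem.List.min? ((pvUsers debt).map (pvBalB debt)) (fun y => y)).getD 0)) (fun y => y) false) = _
    rw [hkeys, List.map_congr_left (fun u _ => hb u),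
        List.filter_congr (fun u _ => by rw [hb u])]
  have hA : smallestNegativeDebt debt = PySem.List.sorted
      ((pvAgg debt).keys.foldl (fun st entry => pvStepA st (entry, (pvAgg debt).getD entry 0)) ([], none)).1
      (fun y => y) false := rfl
  rw [hA, hB]
  exact select_eq (pvAgg debt) (agg_nodup debt)
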